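-- pv_equiv track=rewrite | github.com/tslowndes/mathgen | polls/question_generators/number/factors_multiples_primes.py | format_product_of_primes
-- ===== SOURCE A (Python) =====
-- def format_product_of_primes(product):
--     product.sort()
--     unique = list(set(product))
--     format = ''
--     times = ''
--     unique.sort()
--
--     for n in unique:
--         if unique.index(n) == 0:
--             times = ''
--         else:
--             times = r'\times'
--         if product.count(n) == 1:
--             format = format + times + str(n)
--         else:
--             format = format + times + str(n) + '^' + str(product.count(n))
--     return format
-- ===== SOURCE B (Python) =====
-- def format_product_of_primes(product):
--     product.sort()
--     terms = []
--     i = 0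
--     n = len(product)
--     while i < n:
--         v = product[i]
--         j = i
--         while j < n and product[j] == v:
--             j += 1
--         c = j - i
--         terms.append(str(v) if c == 1 else str(v) + '^' + str(c))
--         i = j
--     return '\\times'.join(terms)
-- ===== Notes on version B (the rewrite author's own statement) =====
-- stated objective: faster
-- what changed: A scans the whole list for every distinct value (set+sort then list.index and two list.count calls per element); B makes a single run-length pass over the sorted list and joins the terms with '\times'.
import Mathlib
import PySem

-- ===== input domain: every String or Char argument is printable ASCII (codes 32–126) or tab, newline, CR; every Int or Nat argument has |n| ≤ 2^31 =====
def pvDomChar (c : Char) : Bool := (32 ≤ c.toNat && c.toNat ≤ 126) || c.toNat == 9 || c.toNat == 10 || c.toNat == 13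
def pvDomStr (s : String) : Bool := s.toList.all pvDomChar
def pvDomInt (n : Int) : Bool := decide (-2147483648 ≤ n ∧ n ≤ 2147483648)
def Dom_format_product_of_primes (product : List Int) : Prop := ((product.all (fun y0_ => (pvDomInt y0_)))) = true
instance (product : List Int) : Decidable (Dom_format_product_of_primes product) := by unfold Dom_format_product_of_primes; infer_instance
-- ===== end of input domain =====

-- B replaces A's per-distinct-value rescans (set + list.index + two list.count per distinct value)
-- with one run-length pass over the sorted list, joining the terms with '\times'; the equivalence
-- proved is about the RETURN value (both Pythons sort `product` in place, identically).

-- ===== PORT A =====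
def format_product_of_primes (product : List Int) : String :=
  let sp := PySem.List.sorted product (fun x => x) false
  let unique := PySem.List.sorted (PySem.Set.ofList sp) (fun x => x) false
  unique.foldl (fun fmt n =>
    let times := if PySem.List.index? unique n = some 0 then "" else "\\times"
    if PySem.List.count sp n = 1 then
      fmt ++ times ++ PySem.Int.toStr n
    else
      fmt ++ times ++ PySem.Int.toStr n ++ "^" ++ PySem.Int.toStr ((PySem.List.count sp n : Nat) : Int)) ""

-- ===== PORT B =====
-- the inner `while` counts the current run (takeWhile); the outer loop resumes after it (dropWhile)
def pvTermsB : List Int → List String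
  | [] => []
  | x :: xs =>
    let c : Nat := 1 + (xs.takeWhile (fun y => y == x)).length
    (if c = 1 then PySem.Int.toStr x
     else PySem.Int.toStr x ++ "^" ++ PySem.Int.toStr (c : Int))
      :: pvTermsB (xs.dropWhile (fun y => y == x))
  termination_by l => l.length
  decreasing_by
    simp only [List.length_cons]
    exact Nat.lt_succ_of_le (List.length_dropWhile_le _ _)

def format_product_of_primes_alt (product : List Int) : String :=
  PySem.Str.join "\\times" (pvTermsB (PySem.List.sorted product (fun x => x) false))

-- ===== PRECONDITION & SPEC =====
def Spec_format_product_of_primes (product : List Int) (out : String) : Prop := out = format_product_of_primes_alt product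
instance (product : List Int) (out : String) : Decidable (Spec_format_product_of_primes product out) := by unfold Spec_format_product_of_primes; infer_instance

-- ===== CLAIM (what is proved, stated in full; the proofs are below) =====
def Claim_equal_format_product_of_primes : Prop := ∀ (product : List Int), Dom_format_product_of_primes product → Spec_format_product_of_primes product (format_product_of_primes product)

-- ===== LEMMAS AND PROOFS =====

-- the run heads of a list: the first element of every maximal run of equal elements
def pvHeads : List Int → List Int
  | [] => []
  | x :: xs => x :: pvHeads (xs.dropWhile (fun y => y == x))
  termination_by l => l.length
  decreasing_by
    simp only [List.length_cons]
    exact Nat.lt_succ_of_le (List.length_dropWhile_le _ _)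

-- the term A builds for value n, with multiplicities counted in s
def pvTermA (s : List Int) (n : Int) : String :=
  if PySem.List.count s n = 1 then PySem.Int.toStr n
  else PySem.Int.toStr n ++ "^" ++ PySem.Int.toStr ((PySem.List.count s n : Nat) : Int)

-- A's loop body, with the sorted list s and the unique list u fixed
def pvBodyA (s u : List Int) (fmt : String) (n : Int) : String :=
  let times := if PySem.List.index? u n = some 0 then "" else "\\times"
  if PySem.List.count s n = 1 then
    fmt ++ times ++ PySem.Int.toStr n
  else
    fmt ++ times ++ PySem.Int.toStr n ++ "^" ++ PySem.Int.toStr ((PySem.List.count s n : Nat) : Int)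

theorem pv_eq_of_mem_takeWhile {x b : Int} {xs : List Int}
    (h : b ∈ xs.takeWhile (fun y => y == x)) : b = x := by
  have hb := List.mem_takeWhile_imp h
  simpa using hb

theorem pvHeads_subset : ∀ (s : List Int) (n : Int), n ∈ pvHeads s → n ∈ s := by
  intro s
  induction s using pvHeads.induct with
  | case1 => intro n h; simp [pvHeads] at h
  | case2 x xs ih =>
    intro n h
    rw [pvHeads] at h
    rcases List.mem_cons.mp h with rfl | h2
    · exact List.mem_cons_self ..
    · exact List.mem_cons_of_mem _ ((List.dropWhile_sublist _).subset (ih n h2))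

theorem pv_lt_of_mem_dropWhile (x : Int) (xs : List Int)
    (h : xs.Pairwise (fun a b : Int => a ≤ b)) (hx : ∀ y ∈ xs, x ≤ y) :
    ∀ y ∈ xs.dropWhile (fun y => y == x), x < y := by
  induction xs with
  | nil => intro y hy; simp at hy
  | cons a t ih =>
    rw [List.pairwise_cons] at h
    rw [List.dropWhile_cons]
    by_cases hax : a = x
    · rw [if_pos (by simp [hax])]
      exact ih h.2 (fun y hy => hx y (List.mem_cons_of_mem _ hy))
    · rw [if_neg (by simp [hax])]
      intro y hy
      have hxa : x < a := lt_of_le_of_ne (hx a (List.mem_cons_self ..)) (Ne.symm hax)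
      rcases List.mem_cons.mp hy with rfl | hyt
      · exact hxa
      · exact lt_of_lt_of_le hxa (h.1 y hyt)

theorem pv_count_run (x : Int) (xs : List Int)
    (hx : ∀ y ∈ xs, x ≤ y) (hp : xs.Pairwise (fun a b : Int => a ≤ b)) :
    PySem.List.count (x :: xs) x = 1 + (xs.takeWhile (fun y => y == x)).length := by
  have hdrop := pv_lt_of_mem_dropWhile x xs hp hx
  have hcnt : xs.count x
      = (xs.takeWhile (fun y => y == x)).count x + (xs.dropWhile (fun y => y == x)).count x := by
    conv_lhs => rw [← List.takeWhile_append_dropWhile (p := fun y => y == x) (l := xs),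
      List.count_append]
  have h1 : (xs.takeWhile (fun y => y == x)).count x = (xs.takeWhile (fun y => y == x)).length :=
    List.count_eq_length.mpr (fun b hb => (pv_eq_of_mem_takeWhile hb).symm)
  have h2 : (xs.dropWhile (fun y => y == x)).count x = 0 :=
    List.count_eq_zero.mpr (fun hmem => lt_irrefl x (hdrop x hmem))
  rw [PySem.List.count_eq, List.count_cons_self, hcnt, h1, h2]
  omega

theorem pv_count_past (x n : Int) (xs : List Int) (hxn : x < n) :
    PySem.List.count (x :: xs) n = PySem.List.count (xs.dropWhile (fun y => y == x)) n := by
  rw [PySem.List.count_eq, PySem.List.count_eq]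
  rw [List.count_cons_of_ne (ne_of_lt hxn)]
  have hcnt : xs.count n
      = (xs.takeWhile (fun y => y == x)).count n + (xs.dropWhile (fun y => y == x)).count n := by
    conv_lhs => rw [← List.takeWhile_append_dropWhile (p := fun y => y == x) (l := xs),
      List.count_append]
  have h1 : (xs.takeWhile (fun y => y == x)).count n = 0 :=
    List.count_eq_zero.mpr (fun hmem =>
      (ne_of_gt hxn) (pv_eq_of_mem_takeWhile hmem))
  rw [hcnt, h1]
  omega

theorem pvTermsB_eq : ∀ (s : List Int), s.Pairwise (fun a b : Int => a ≤ b) →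
    pvTermsB s = (pvHeads s).map (pvTermA s) := by
  intro s
  induction s using pvHeads.induct with
  | case1 => intro _; simp [pvTermsB, pvHeads]
  | case2 x xs ih =>
    intro hs
    rw [List.pairwise_cons] at hs
    have hdrop := pv_lt_of_mem_dropWhile x xs hs.2 hs.1
    have hdw : (xs.dropWhile (fun y => y == x)).Pairwise (fun a b : Int => a ≤ b) :=
      hs.2.sublist (List.dropWhile_sublist _)
    simp only [pvTermsB, pvHeads, List.map_cons]
    congr 1
    · rw [pvTermA, pv_count_run x xs hs.1 hs.2]
    · rw [ih hdw]
      refine List.map_congr_left (fun n hn => ?_)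
      have hxn : x < n := hdrop n (pvHeads_subset _ n hn)
      rw [pvTermA, pvTermA, pv_count_past x n xs hxn]

theorem pvHeads_pairwise : ∀ (s : List Int), s.Pairwise (fun a b : Int => a ≤ b) →
    (pvHeads s).Pairwise (fun a b : Int => a < b) := by
  intro s
  induction s using pvHeads.induct with
  | case1 => intro _; simp [pvHeads]
  | case2 x xs ih =>
    intro hs
    rw [List.pairwise_cons] at hs
    rw [pvHeads, List.pairwise_cons]
    have hdrop := pv_lt_of_mem_dropWhile x xs hs.2 hs.1
    exact ⟨fun n hn => hdrop n (pvHeads_subset _ n hn),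
      ih (hs.2.sublist (List.dropWhile_sublist _))⟩

theorem pv_mem_pvHeads : ∀ (s : List Int), s.Pairwise (fun a b : Int => a ≤ b) →
    ∀ n ∈ s, n ∈ pvHeads s := by
  intro s
  induction s using pvHeads.induct with
  | case1 => intro _ n hn; cases hn
  | case2 x xs ih =>
    intro hs n hn
    rw [List.pairwise_cons] at hs
    rw [pvHeads]
    rcases List.mem_cons.mp hn with rfl | hmem
    · exact List.mem_cons_self ..
    · rw [← List.takeWhile_append_dropWhile (p := fun y => y == x) (l := xs)] at hmem
      rcases List.mem_append.mp hmem with htake | hdrop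
      · have hnx : n = x := pv_eq_of_mem_takeWhile htake
        rw [hnx]
        exact List.mem_cons_self ..
      · exact List.mem_cons_of_mem _
          (ih (hs.2.sublist (List.dropWhile_sublist _)) n hdrop)

theorem pv_unique_eq (s : List Int) (hs : s.Pairwise (fun a b : Int => a ≤ b)) :
    PySem.List.sorted (PySem.Set.ofList s) (fun x => x) false = pvHeads s := by
  have hpw := pvHeads_pairwise s hs
  have hnd : (pvHeads s).Nodup := hpw.imp (fun hab => ne_of_lt hab)
  have hperm : (pvHeads s).Perm (PySem.Set.ofList s) :=
    (List.perm_ext_iff_of_nodup hnd (PySem.Set.nodup_ofList s)).mpr (fun a =>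
      ⟨fun ha => (PySem.Set.mem_ofList s a).mpr (pvHeads_subset s a ha),
       fun ha => pv_mem_pvHeads s hs a ((PySem.Set.mem_ofList s a).mp ha)⟩)
  exact PySem.List.sorted_eq_of_perm_of_pairwise_lt _ _ _ hperm hpw

theorem pvBodyA_toList (s u : List Int) (fmt : String) (n : Int) :
    (pvBodyA s u fmt n).toList =
      fmt.toList ++ (if PySem.List.index? u n = some 0 then ("" : String) else "\\times").toList
        ++ (pvTermA s n).toList := by
  simp only [pvBodyA, pvTermA]
  split_ifs <;> simp [String.toList_append, List.append_assoc]

theorem pv_join_shift (sep a b : List Char) (rest : List (List Char)) :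
    PySem.Chars.join sep ((a ++ sep ++ b) :: rest) = a ++ sep ++ PySem.Chars.join sep (b :: rest) := by
  cases rest with
  | nil => rw [PySem.Chars.join_singleton, PySem.Chars.join_singleton]
  | cons c r =>
    rw [PySem.Chars.join_cons_cons, PySem.Chars.join_cons_cons]
    simp [List.append_assoc]

theorem pv_fold_toList (s u : List Int) :
    ∀ (t : List Int) (acc : String), (∀ n ∈ t, PySem.List.index? u n ≠ some 0) →
      (t.foldl (pvBodyA s u) acc).toList
        = PySem.Chars.join ("\\times" : String).toList
            (acc.toList :: t.map (fun n => (pvTermA s n).toList)) := by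
  intro t
  induction t with
  | nil =>
    intro acc _
    rw [List.foldl_nil, List.map_nil]
    exact (PySem.Chars.join_singleton _ _).symm
  | cons n t' ih =>
    intro acc hne
    rw [List.foldl_cons, List.map_cons]
    rw [ih (pvBodyA s u acc n) (fun m hm => hne m (List.mem_cons_of_mem _ hm))]
    have hb := pvBodyA_toList s u acc n
    rw [if_neg (hne n (List.mem_cons_self ..))] at hb
    rw [hb, pv_join_shift, PySem.Chars.join_cons_cons]

theorem pv_main (s : List Int) (hs : s.Pairwise (fun a b : Int => a ≤ b)) :
    (PySem.List.sorted (PySem.Set.ofList s) (fun x => x) false).foldl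
        (pvBodyA s (PySem.List.sorted (PySem.Set.ofList s) (fun x => x) false)) ""
      = PySem.Str.join "\\times" (pvTermsB s) := by
  rw [pv_unique_eq s hs, pvTermsB_eq s hs]
  apply String.toList_inj.mp
  have hpw := pvHeads_pairwise s hs
  cases hu : pvHeads s with
  | nil => simp
  | cons h t =>
    rw [hu] at hpw
    have hcond : ∀ n ∈ t, PySem.List.index? (h :: t) n ≠ some 0 := by
      intro n hn
      have hne : h ≠ n := ne_of_lt ((List.pairwise_cons.mp hpw).1 n hn)
      rw [PySem.List.index?_cons_of_ne t hne]
      cases PySem.List.index? t n <;> simp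
    have hacc : (pvBodyA s (h :: t) "" h).toList = (pvTermA s h).toList := by
      rw [pvBodyA_toList, if_pos (PySem.List.index?_cons_self h t)]
      simp
    rw [List.foldl_cons, pv_fold_toList s (h :: t) t (pvBodyA s (h :: t) "" h) hcond, hacc]
    simp [List.map_cons, List.map_map, Function.comp_def]

theorem pv_portA_eq (product : List Int) :
    format_product_of_primes product
      = (PySem.List.sorted (PySem.Set.ofList (PySem.List.sorted product (fun x => x) false)) (fun x => x) false).foldl
          (pvBodyA (PySem.List.sorted product (fun x => x) false)
            (PySem.List.sorted (PySem.Set.ofList (PySem.List.sorted product (fun x => x) false)) (fun x => x) false)) "" := rfl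

-- ===== VERDICT (by name: the statement is the Claim_ definition above) =====
theorem format_product_of_primes_spec : Claim_equal_format_product_of_primes := by
  intro product _
  show format_product_of_primes product = format_product_of_primes_alt product
  rw [pv_portA_eq product]
  exact pv_main (PySem.List.sorted product (fun x => x) false)
    (PySem.List.sorted_pairwise product (fun x => x))
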